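-- pv_equiv track=rewrite | github.com/christophstach/det-gan-research | models/hdcgan_generator.py | calculate_latent_splits
-- ===== SOURCE A (Python) =====
-- import math
--
-- def calculate_latent_splits(latent_dim, n_blocks):
--     closest_power_of_two = 1
--     max_divisible = math.ceil(latent_dim / (n_blocks + 1))
--
--     while True:
--         if closest_power_of_two > max_divisible:
--             break
--         else:
--             closest_power_of_two *= 2
--
--     closest_power_of_two //= 2
--
--     splits = [closest_power_of_two for _ in range(n_blocks)]
--     splits.insert(0, latent_dim - (n_blocks * closest_power_of_two))
--
--     return splits
-- ===== SOURCE B (Python) =====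
-- import math
--
-- def calculate_latent_splits(latent_dim, n_blocks):
--     max_divisible = math.ceil(latent_dim / (n_blocks + 1))
--     p = 0 if max_divisible < 1 else 1 << (max_divisible.bit_length() - 1)
--     return [latent_dim - n_blocks * p] + [p] * n_blocks
-- ===== Notes on version B (the rewrite author's own statement) =====
-- stated objective: idiomatic
-- what changed: The doubling while-loop that searches for the largest power of two <= max_divisible is replaced by the closed-form bit computation 1 << (max_divisible.bit_length() - 1) (0 when max_divisible < 1), and the list is built directly instead of comprehension-plus-insert.
import Mathlib
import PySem

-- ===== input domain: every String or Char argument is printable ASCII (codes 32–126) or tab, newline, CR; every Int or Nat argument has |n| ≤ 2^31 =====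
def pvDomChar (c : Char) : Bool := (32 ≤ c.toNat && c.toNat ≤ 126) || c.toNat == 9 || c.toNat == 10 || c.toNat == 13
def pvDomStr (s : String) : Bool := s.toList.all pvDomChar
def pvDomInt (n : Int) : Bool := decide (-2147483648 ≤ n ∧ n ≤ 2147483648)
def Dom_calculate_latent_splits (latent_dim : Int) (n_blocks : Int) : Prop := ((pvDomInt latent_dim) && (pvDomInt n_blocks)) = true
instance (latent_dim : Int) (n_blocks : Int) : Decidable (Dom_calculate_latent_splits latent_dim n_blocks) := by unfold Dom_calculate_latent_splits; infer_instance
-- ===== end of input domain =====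

-- B replaces A's doubling while-loop with the closed-form bit computation 1 << (bit_length - 1) (idiomatic).


-- ===== PORT A =====
-- A's `while True: if c > max_divisible: break else: c *= 2` loop, started at c = 1.
def growPow (maxd : Int) (c : Int) (hc : 1 ≤ c) : Int :=
  if c > maxd then c else growPow maxd (c * 2) (by omega)
termination_by (maxd + 1 - c).toNat
decreasing_by omega

-- math.ceil(a / b) on |a|,|b| ≤ 2^31 is exact (quotient magnitude < 2^53), so it is the integer ceiling -((-a) // b).
def calculate_latent_splits (latent_dim : Int) (n_blocks : Int) : List Int :=
  let max_divisible := -(PySem.Int.floordiv (-latent_dim) (n_blocks + 1))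
  let closest := PySem.Int.floordiv (growPow max_divisible 1 (by omega)) 2
  (latent_dim - n_blocks * closest) :: (PySem.List.pyRange 0 n_blocks 1).map (fun _ => closest)

-- ===== PORT B =====
def calculate_latent_splits_alt (latent_dim : Int) (n_blocks : Int) : List Int :=
  let max_divisible := -(PySem.Int.floordiv (-latent_dim) (n_blocks + 1))
  let p : Int := if max_divisible < 1 then 0 else (1 : Int) <<< (PySem.Int.bitLength max_divisible - 1)
  (latent_dim - n_blocks * p) :: List.replicate n_blocks.toNat p

-- ===== PRECONDITION & SPEC =====
-- Pre_ excludes exactly n_blocks = -1, where Python A raises ZeroDivisionError.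
def Pre_calculate_latent_splits (latent_dim : Int) (n_blocks : Int) : Prop := n_blocks ≠ -1
instance (latent_dim : Int) (n_blocks : Int) : Decidable (Pre_calculate_latent_splits latent_dim n_blocks) := by unfold Pre_calculate_latent_splits; infer_instance
def pvWitness_calculate_latent_splits : Int × Int := (128, 3)

def Spec_calculate_latent_splits (latent_dim : Int) (n_blocks : Int) (out : List Int) : Prop := out = calculate_latent_splits_alt latent_dim n_blocks
instance (latent_dim : Int) (n_blocks : Int) (out : List Int) : Decidable (Spec_calculate_latent_splits latent_dim n_blocks out) := by unfold Spec_calculate_latent_splits; infer_instance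

-- ===== CLAIM (what is proved, stated in full; the proofs are below) =====
def Claim_equal_calculate_latent_splits : Prop := ∀ (latent_dim : Int) (n_blocks : Int), Dom_calculate_latent_splits latent_dim n_blocks → Pre_calculate_latent_splits latent_dim n_blocks → Spec_calculate_latent_splits latent_dim n_blocks (calculate_latent_splits latent_dim n_blocks)

-- ===== LEMMAS AND PROOFS =====


theorem maxd_lt (maxd : Int) (hm : 1 ≤ maxd) : (maxd : Int) < 2 ^ PySem.Int.bitLength maxd := by
  have h := PySem.Int.lt_two_pow_bitLength maxd
  have h2 : (maxd.natAbs : Int) < ((2 ^ PySem.Int.bitLength maxd : Nat) : Int) := by exact_mod_cast h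
  rw [Int.natAbs_of_nonneg (by omega)] at h2
  simpa using h2
theorem le_maxd (maxd : Int) (hm : 1 ≤ maxd) : (2:Int) ^ (PySem.Int.bitLength maxd - 1) ≤ maxd := by
  have h := PySem.Int.two_pow_bitLength_le maxd (by omega)
  have h2 : ((2 ^ (PySem.Int.bitLength maxd - 1) : Nat) : Int) ≤ (maxd.natAbs : Int) := by exact_mod_cast h
  rw [Int.natAbs_of_nonneg (by omega)] at h2
  simpa using h2
theorem exp_lt (j k : Nat) (h : (2:Int)^j < 2^k) : j < k := by
  by_contra hk
  exact absurd (pow_le_pow_right₀ (by norm_num) (by omega) : (2:Int)^k ≤ 2^j) (by omega)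

theorem growPow_congr (maxd c c' : Int) (hc : 1 ≤ c) (hc' : 1 ≤ c') (h : c = c') :
    growPow maxd c hc = growPow maxd c' hc' := by subst h; rfl

theorem growPow_pow (maxd : Int) (hm : 1 ≤ maxd) :
    ∀ d j (h : (1:Int) ≤ 2 ^ j), PySem.Int.bitLength maxd ≤ j + d →
      growPow maxd (2 ^ j) h = 2 ^ (max j (PySem.Int.bitLength maxd)) := by
  intro d
  induction d with
  | zero =>
    intro j h hL
    have hgt : 2 ^ j > maxd :=
      lt_of_lt_of_le (maxd_lt maxd hm) (pow_le_pow_right₀ (by norm_num) (by omega))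
    rw [growPow, if_pos hgt, Nat.max_eq_left (by omega)]
  | succ d ih =>
    intro j h hL
    by_cases hgt : 2 ^ j > maxd
    · have hjL : PySem.Int.bitLength maxd ≤ j := by
        have h1 := le_maxd maxd hm
        have h2 := exp_lt (PySem.Int.bitLength maxd - 1) j (lt_of_le_of_lt h1 hgt)
        omega
      rw [growPow, if_pos hgt, Nat.max_eq_left hjL]
    · have hjL : j < PySem.Int.bitLength maxd :=
        exp_lt j _ (lt_of_le_of_lt (not_lt.mp hgt) (maxd_lt maxd hm))
      rw [growPow, if_neg hgt,
          growPow_congr maxd (2^j*2) (2^(j+1)) (by nlinarith [h]) (one_le_pow₀ (by norm_num)) (pow_succ 2 j).symm,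
          ih (j+1) (one_le_pow₀ (by norm_num)) (by omega)]
      congr 1
      omega

theorem bitLength_pos (maxd : Int) (hm : 1 ≤ maxd) : 1 ≤ PySem.Int.bitLength maxd := by
  by_contra h
  have := maxd_lt maxd hm
  interval_cases h2 : PySem.Int.bitLength maxd
  omega

theorem grow_one (maxd : Int) (hm : 1 ≤ maxd) :
    growPow maxd 1 (by omega) = 2 ^ (PySem.Int.bitLength maxd) := by
  rw [growPow_congr maxd 1 (2^0) (by omega) (by norm_num) (by norm_num),
      growPow_pow maxd hm (PySem.Int.bitLength maxd) 0 (by norm_num) (by omega)]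
  simp

theorem map_const_pyRange (n : Int) (c : Int) :
    (PySem.List.pyRange 0 n 1).map (fun _ => c) = List.replicate n.toNat c := by
  rw [PySem.List.pyRange_one]
  simp [Function.comp_def, List.map_const']

-- ===== VERDICT (by name: the statement is the Claim_ definition above) =====
theorem calculate_latent_splits_spec : Claim_equal_calculate_latent_splits := by
  intro latent_dim n_blocks _ hpre
  unfold Spec_calculate_latent_splits calculate_latent_splits calculate_latent_splits_alt
  dsimp only
  set M := -(PySem.Int.floordiv (-latent_dim) (n_blocks + 1)) with hM
  by_cases h1 : M < 1
  · rw [if_pos h1, growPow, if_pos (by omega : (1:Int) > M)]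
    rw [(by decide : PySem.Int.floordiv 1 2 = 0), map_const_pyRange]
  · rw [if_neg h1, grow_one M (by omega)]
    have hL := bitLength_pos M (by omega)
    have hd : PySem.Int.floordiv ((2:Int) ^ PySem.Int.bitLength M) 2
        = 2 ^ (PySem.Int.bitLength M - 1) := by
      rw [PySem.Int.floordiv_eq_ediv_of_pos (by norm_num)]
      rw [show (2:Int) ^ PySem.Int.bitLength M = 2 ^ (PySem.Int.bitLength M - 1) * 2 by
        rw [← pow_succ]; congr 1; omega]
      exact Int.mul_ediv_cancel _ (by norm_num)
    rw [hd, map_const_pyRange, Int.shiftLeft_eq, one_mul]
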